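-- pv_equiv track=rewrite | github.com/einsxiao/pond | scripts/pond_basic.py | argv2argsoptions
-- ===== SOURCE A (Python) =====
-- def argv2argsoptions(args,single=[],transform={}):
--     argsleft = []
--     options = {}
--     key = None
--     for i in range(len(args)):
--         arg = args[i]
--         if arg[0] == '-':
--             while arg and arg[0] == '-': arg = arg[1:]
--             if not arg : raise Exception('Invalid argument specified "%s"'%args[i])
--             key = arg
--             #transform
--             tokey = transform.get(key)
--             if tokey: key = tokey
--             if key in single:
--                 options[key] = 'True'
--                 key = None
--             continue
--         if key:
--             options[key] = arg
--             key = None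
--         else:
--             argsleft.append(arg)
--     return (argsleft,options)
-- ===== SOURCE B (Python) =====
-- def argv2argsoptions(args, single=[], transform={}):
--     argsleft = []
--     options = {}
--     i = 0
--     n = len(args)
--     while i < n:
--         tok = args[i]
--         if tok.startswith('-'):
--             key = tok.lstrip('-')
--             if not key:
--                 raise Exception('Invalid argument specified "%s"' % tok)
--             key = transform.get(key) or key
--             if key in single:
--                 options[key] = 'True'
--                 i += 1
--             elif i + 1 < n and not args[i + 1].startswith('-'):
--                 options[key] = args[i + 1]
--                 i += 2
--             else:
--                 i += 1
--         else:
--             argsleft.append(tok)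
--             i += 1
--     return (argsleft, options)
-- ===== Notes on version B (the rewrite author's own statement) =====
-- stated objective: alternative
-- what changed: Replaces A's pending-key state machine (carrying `key` across iterations) with an index-based while loop that resolves each option in its own iteration via one-token lookahead, advancing by 1 or 2.
import Mathlib
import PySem

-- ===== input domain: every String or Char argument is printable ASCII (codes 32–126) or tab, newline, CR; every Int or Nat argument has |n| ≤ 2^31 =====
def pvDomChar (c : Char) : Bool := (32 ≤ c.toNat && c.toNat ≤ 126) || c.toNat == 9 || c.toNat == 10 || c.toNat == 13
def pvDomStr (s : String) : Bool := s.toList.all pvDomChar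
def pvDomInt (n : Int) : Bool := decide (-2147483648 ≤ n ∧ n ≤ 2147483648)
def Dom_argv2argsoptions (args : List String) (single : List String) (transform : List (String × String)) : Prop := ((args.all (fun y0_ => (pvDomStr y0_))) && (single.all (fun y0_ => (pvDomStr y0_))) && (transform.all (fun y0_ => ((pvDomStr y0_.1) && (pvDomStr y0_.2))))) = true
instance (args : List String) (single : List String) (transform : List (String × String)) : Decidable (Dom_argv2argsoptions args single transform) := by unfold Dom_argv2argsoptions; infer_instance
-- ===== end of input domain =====

-- B replaces A's pending-`key` state machine with an index-based lookahead loop (advance by 1 or 2);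
-- equal return values on Pre_ (A mutates nothing observable).

-- ===== PORT A =====
-- Python: `while arg and arg[0] == '-': arg = arg[1:]` — ported by hand, exact
def pvStripDashes (s : List Char) : List Char :=
  match s with
  | [] => []
  | c :: rest => if c = '-' then pvStripDashes rest else c :: rest

-- Python: `tokey = transform.get(key); if tokey: key = tokey` ('' is falsy)
def pvTransformKey (transform : List (String × String)) (key : String) : String :=
  match (PySem.Dict.ofList transform).get? key with
  | some tokey => if tokey = "" then key else tokey
  | none => key

def pvLoopA (single : List String) (transform : List (String × String)) :
    List String → List String → PySem.Dict String String → Option String →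
    List String × List (String × String)
  | [], argsleft, options, _ => (argsleft, options.items)
  | arg :: rest, argsleft, options, key =>
    if PySem.Str.pyGet? arg 0 = some '-' then
      let stripped := pvStripDashes arg.toList
      if stripped = [] then (argsleft, options.items)  -- Python raises Exception here; excluded by Pre_
      else
        let k := pvTransformKey transform (String.ofList stripped)
        if single.contains k then
          pvLoopA single transform rest argsleft (options.insert k "True") none
        else
          pvLoopA single transform rest argsleft options (some k)
    else
      -- (arg = "" makes Python raise IndexError at arg[0]; excluded by Pre_)
      match key with
      | some k => pvLoopA single transform rest argsleft (options.insert k arg) none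
      | none => pvLoopA single transform rest (argsleft ++ [arg]) options none

def argv2argsoptions (args : List String) (single : List String) (transform : List (String × String)) : List String × (List (String × String)) :=
  pvLoopA single transform args [] PySem.Dict.empty none

-- ===== PORT B =====
-- Python: `key = transform.get(key) or key` ('' and None are falsy)
def pvGetOr (transform : List (String × String)) (key : String) : String :=
  ((PySem.Dict.ofList transform).get? key).elim key (fun t => if t = "" then key else t)

def pvLoopB (single : List String) (transform : List (String × String)) :
    List String → List String → PySem.Dict String String →
    List String × List (String × String)
  | [], argsleft, options => (argsleft, options.items)
  | [tok], argsleft, options =>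
    -- last token: the lookahead `i + 1 < n` fails
    if PySem.Str.startswith tok "-" then
      let keyChars := tok.toList.dropWhile (fun c => c = '-')
      if keyChars = [] then (argsleft, options.items)  -- Python raises Exception here; excluded by Pre_
      else
        let k := pvGetOr transform (String.ofList keyChars)
        if single.contains k then (argsleft, (options.insert k "True").items)
        else (argsleft, options.items)
    else (argsleft ++ [tok], options.items)
  | tok :: nxt :: rest', argsleft, options =>
    if PySem.Str.startswith tok "-" then
      -- tok.lstrip('-') : ported by hand as dropWhile, exact for a single strip char
      let keyChars := tok.toList.dropWhile (fun c => c = '-')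
      if keyChars = [] then (argsleft, options.items)  -- Python raises Exception here; excluded by Pre_
      else
        let k := pvGetOr transform (String.ofList keyChars)
        if single.contains k then
          pvLoopB single transform (nxt :: rest') argsleft (options.insert k "True")
        else if PySem.Str.startswith nxt "-" then
          pvLoopB single transform (nxt :: rest') argsleft options
        else
          pvLoopB single transform rest' argsleft (options.insert k nxt)
    else
      pvLoopB single transform (nxt :: rest') (argsleft ++ [tok]) options

def argv2argsoptions_alt (args : List String) (single : List String) (transform : List (String × String)) : List String × (List (String × String)) :=
  pvLoopB single transform args [] PySem.Dict.empty

-- ===== PRECONDITION & SPEC =====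
-- Pre_ excludes exactly the inputs where A raises: a token that is empty (IndexError at arg[0])
-- or consists only of '-' characters (explicit Exception). Every other input is admitted.
def Pre_argv2argsoptions (args : List String) (single : List String) (transform : List (String × String)) : Prop :=
  args.all (fun a => a.toList.any (fun c => c ≠ '-')) = true
instance (args : List String) (single : List String) (transform : List (String × String)) : Decidable (Pre_argv2argsoptions args single transform) := by unfold Pre_argv2argsoptions; infer_instance

def pvWitness_argv2argsoptions : List String × List String × (List (String × String)) :=
  (["-v", "-o", "out.txt", "file"], ["v"], [("o", "output")])

def Spec_argv2argsoptions (args : List String) (single : List String) (transform : List (String × String)) (out : List String × (List (String × String))) : Prop := out = argv2argsoptions_alt args single transform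
instance (args : List String) (single : List String) (transform : List (String × String)) (out : List String × (List (String × String))) : Decidable (Spec_argv2argsoptions args single transform out) := by unfold Spec_argv2argsoptions; infer_instance

-- ===== CLAIM (what is proved, stated in full; the proofs are below) =====
def Claim_equal_argv2argsoptions : Prop := ∀ (args : List String) (single : List String) (transform : List (String × String)), Dom_argv2argsoptions args single transform → Pre_argv2argsoptions args single transform → Spec_argv2argsoptions args single transform (argv2argsoptions args single transform)

-- ===== LEMMAS AND PROOFS =====

-- For a nonempty token, A's test arg[0] == '-' and B's test arg.startswith('-') coincide.
lemma pv_isOpt_iff (s : String) (h : s.toList ≠ []) :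
    PySem.Str.pyGet? s 0 = some '-' ↔ PySem.Str.startswith s "-" = true := by
  rcases hl : s.toList with _ | ⟨c, cs⟩
  · exact absurd hl h
  · simp [PySem.Str.pyGet?, PySem.Str.startswith, hl, PySem.Chars.pyGet?, PySem.List.pyGet?,
      PySem.Chars.startswith, List.isPrefixOf, PySem.List.pyIdx?]
    exact eq_comm

lemma pv_nonempty_of_any {l : List Char} (h : l.any (fun c => c ≠ '-') = true) : l ≠ [] := by
  rintro rfl; simp at h

lemma pv_drop_ne_nil {l : List Char} (h : l.any (fun c => c ≠ '-') = true) :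
    l.dropWhile (fun c => c = '-') ≠ [] := by
  intro hnil
  rw [List.dropWhile_eq_nil_iff] at hnil
  simp only [List.any_eq_true] at h
  obtain ⟨x, hx, hne⟩ := h
  have := hnil x hx
  simp_all

-- A's hand strip loop is B's dropWhile.
lemma pv_strip_eq (s : List Char) : pvStripDashes s = s.dropWhile (fun c => c = '-') := by
  induction s with
  | nil => rfl
  | cons c cs ih => by_cases h : c = '-' <;> simp [pvStripDashes, List.dropWhile, h, ih]

-- The two key-adjustment helpers agree.
lemma pv_key_eq (transform : List (String × String)) (k : String) :
    pvTransformKey transform k = pvGetOr transform k := by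
  unfold pvTransformKey pvGetOr
  cases (PySem.Dict.ofList transform).get? k <;> rfl

-- A dash-initial token makes the pending key irrelevant in A's loop.
lemma pv_loopA_key_irrel (single : List String) (transform : List (String × String))
    (arg : String) (rest argsleft : List String) (options : PySem.Dict String String)
    (key : Option String) (h : PySem.Str.pyGet? arg 0 = some '-') :
    pvLoopA single transform (arg :: rest) argsleft options key =
      pvLoopA single transform (arg :: rest) argsleft options none := by
  rw [pvLoopA.eq_def, pvLoopA.eq_def]
  simp only [h, if_true]

lemma pv_main (single : List String) (transform : List (String × String)) :
    ∀ (n : Nat) (args : List String), args.length ≤ n →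
      args.all (fun a => a.toList.any (fun c => c ≠ '-')) = true →
      ∀ (argsleft : List String) (options : PySem.Dict String String),
        pvLoopA single transform args argsleft options none =
          pvLoopB single transform args argsleft options := by
  intro n
  induction n with
  | zero =>
    intro args hlen _ al opts
    have : args = [] := List.eq_nil_of_length_eq_zero (Nat.le_zero.mp hlen)
    subst this; rfl
  | succ n ih =>
    intro args hlen hpre al opts
    match args with
    | [] => rfl
    | [tok] =>
      simp only [List.all_cons, List.all_nil, Bool.and_true] at hpre
      have hne := pv_nonempty_of_any hpre
      have hdrop := pv_drop_ne_nil hpre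
      cases hs : PySem.Str.startswith tok "-" with
      | true =>
        have hopt : PySem.Str.pyGet? tok 0 = some '-' := (pv_isOpt_iff tok hne).mpr hs
        rw [pvLoopA, pvLoopB]
        simp only [hopt, hs, if_true, pv_strip_eq, pv_key_eq, if_neg hdrop]
        split <;> rfl
      | false =>
        have hopt : ¬ PySem.Str.pyGet? tok 0 = some '-' := fun h => by
          rw [(pv_isOpt_iff tok hne).mp h] at hs; simp at hs
        rw [pvLoopA, pvLoopB]
        simp only [hopt, hs, Bool.false_eq_true, if_false]
        rfl
    | tok :: nxt :: rest' =>
      simp only [List.all_cons, Bool.and_eq_true] at hpre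
      obtain ⟨htok, hnxt, hrest⟩ := hpre
      have hlen' : (nxt :: rest').length ≤ n := by simpa using Nat.succ_le_succ_iff.mp hlen
      have hlen'' : rest'.length ≤ n := by simpa using Nat.le_of_succ_le hlen'
      have hpre' : (nxt :: rest').all (fun a => a.toList.any (fun c => c ≠ '-')) = true := by
        simp only [List.all_cons, Bool.and_eq_true]; exact ⟨hnxt, hrest⟩
      have hnetok := pv_nonempty_of_any htok
      have hnenxt := pv_nonempty_of_any hnxt
      cases hs : PySem.Str.startswith tok "-" with
      | true =>
        have hopt : PySem.Str.pyGet? tok 0 = some '-' := (pv_isOpt_iff tok hnetok).mpr hs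
        have hdrop := pv_drop_ne_nil htok
        rw [pvLoopA, pvLoopB]
        simp only [hopt, hs, if_true, pv_strip_eq, pv_key_eq, if_neg hdrop]
        set k := pvGetOr transform (String.ofList (tok.toList.dropWhile (fun c => c = '-'))) with hk
        by_cases hsing : single.contains k
        · simp only [hsing, if_true]
          exact ih (nxt :: rest') hlen' hpre' al (opts.insert k "True")
        · simp only [hsing, if_false, Bool.false_eq_true]
          cases hs2 : PySem.Str.startswith nxt "-" with
          | true =>
            have hopt2 : PySem.Str.pyGet? nxt 0 = some '-' := (pv_isOpt_iff nxt hnenxt).mpr hs2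
            rw [pv_loopA_key_irrel single transform nxt rest' al opts (some k) hopt2]
            exact ih (nxt :: rest') hlen' hpre' al opts
          | false =>
            have hopt2 : ¬ PySem.Str.pyGet? nxt 0 = some '-' := fun h => by
              rw [(pv_isOpt_iff nxt hnenxt).mp h] at hs2; simp at hs2
            have hstep : pvLoopA single transform (nxt :: rest') al opts (some k) =
                pvLoopA single transform rest' al (opts.insert k nxt) none := by
              rw [pvLoopA]
              simp only [hopt2, if_false]
            rw [hstep]
            exact ih rest' hlen'' hrest al (opts.insert k nxt)
      | false =>
        have hopt : ¬ PySem.Str.pyGet? tok 0 = some '-' := fun h => by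
          rw [(pv_isOpt_iff tok hnetok).mp h] at hs; simp at hs
        rw [pvLoopA, pvLoopB]
        simp only [hopt, hs, Bool.false_eq_true, if_false]
        exact ih (nxt :: rest') hlen' hpre' (al ++ [tok]) opts

-- ===== VERDICT (by name: the statement is the Claim_ definition above) =====
theorem argv2argsoptions_spec : Claim_equal_argv2argsoptions := by
  intro args single transform _ hpre
  unfold Spec_argv2argsoptions argv2argsoptions argv2argsoptions_alt
  exact pv_main single transform args.length args le_rfl hpre [] PySem.Dict.empty
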